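-- pv_equiv track=rewrite | github.com/arrowlimo/arrow-limo | scripts/check_cibc_61615_presence.py | find_date_column
-- ===== SOURCE A (Python) =====
-- from typing import List, Tuple
--
-- def find_date_column(cols: List[Tuple[str, str]]) -> str:
--     for name, dtype in cols:
--         if dtype in ("date", "timestamp without time zone", "timestamp with time zone"):
--             if any(k in name for k in ("date", "posted", "trans", "txn")):
--                 return name
--     # fallback: any date/timestamp
--     for name, dtype in cols:
--         if dtype in ("date", "timestamp without time zone", "timestamp with time zone"):
--             return name
--     return ""
-- ===== SOURCE B (Python) =====
-- def find_date_column(cols):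
--     DATE_TYPES = {"date", "timestamp without time zone", "timestamp with time zone"}
--     KEYWORDS = ("date", "posted", "trans", "txn")
--     fallback = None
--     for name, dtype in cols:
--         if dtype in DATE_TYPES:
--             if any(k in name for k in KEYWORDS):
--                 return name
--             if fallback is None:
--                 fallback = name
--     return fallback if fallback is not None else ""
-- ===== Notes on version B (the rewrite author's own statement) =====
-- stated objective: simpler
-- what changed: Replaced A's two sequential scans of cols with a single pass that returns a keyword-matching date column eagerly and keeps the first date column seen as a fallback accumulator.
import Mathlib
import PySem

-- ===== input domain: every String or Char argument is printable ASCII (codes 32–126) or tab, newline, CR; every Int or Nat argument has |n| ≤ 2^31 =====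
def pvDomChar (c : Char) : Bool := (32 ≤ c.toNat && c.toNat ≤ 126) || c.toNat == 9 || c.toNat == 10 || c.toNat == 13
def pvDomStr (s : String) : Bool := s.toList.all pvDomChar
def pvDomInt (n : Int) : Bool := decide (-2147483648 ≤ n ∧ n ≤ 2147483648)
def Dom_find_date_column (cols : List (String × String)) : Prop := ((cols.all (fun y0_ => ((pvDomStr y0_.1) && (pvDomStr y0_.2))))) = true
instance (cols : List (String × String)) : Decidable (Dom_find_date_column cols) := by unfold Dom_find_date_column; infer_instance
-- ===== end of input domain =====

-- B performs A's two scans in one pass, keeping the first date column as a fallback accumulator (objective: simpler).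

-- ===== PORT A =====
def pvIsDateType (d : String) : Bool :=
  d == "date" || d == "timestamp without time zone" || d == "timestamp with time zone"

def pvHasKeyword (n : String) : Bool :=
  PySem.Str.isIn "date" n || PySem.Str.isIn "posted" n || PySem.Str.isIn "trans" n || PySem.Str.isIn "txn" n

-- first loop of A: first date-typed column whose name contains a keyword
def pvLoop1 : List (String × String) → Option String
  | [] => none
  | (n, d) :: rest =>
    if pvIsDateType d then
      if pvHasKeyword n then some n else pvLoop1 rest
    else pvLoop1 rest

-- second loop of A: first date-typed column
def pvLoop2 : List (String × String) → Option String
  | [] => none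
  | (n, d) :: rest => if pvIsDateType d then some n else pvLoop2 rest

def find_date_column (cols : List (String × String)) : String :=
  match pvLoop1 cols with
  | some n => n
  | none =>
    match pvLoop2 cols with
    | some n => n
    | none => ""

-- ===== PORT B =====
def pvDateTypes : List String := ["date", "timestamp without time zone", "timestamp with time zone"]
def pvKeywords : List String := ["date", "posted", "trans", "txn"]

-- single pass with a fallback accumulator (B's loop)
def pvAltLoop : List (String × String) → Option String → String
  | [], fb => fb.getD ""
  | (n, d) :: rest, fb =>
    if pvDateTypes.contains d then
      if pvKeywords.any (fun k => PySem.Str.isIn k n) then n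
      else pvAltLoop rest (if fb.isNone then some n else fb)
    else pvAltLoop rest fb

def find_date_column_alt (cols : List (String × String)) : String :=
  pvAltLoop cols none

-- ===== PRECONDITION & SPEC =====
def Spec_find_date_column (cols : List (String × String)) (out : String) : Prop := out = find_date_column_alt cols
instance (cols : List (String × String)) (out : String) : Decidable (Spec_find_date_column cols out) := by unfold Spec_find_date_column; infer_instance

-- ===== CLAIM (what is proved, stated in full; the proofs are below) =====
def Claim_equal_find_date_column : Prop := ∀ (cols : List (String × String)), Dom_find_date_column cols → Spec_find_date_column cols (find_date_column cols)

-- ===== LEMMAS AND PROOFS =====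

theorem pvContains_eq_isDateType (d : String) : pvDateTypes.contains d = pvIsDateType d := by
  simp only [pvDateTypes, pvIsDateType, List.contains_cons, List.contains_nil, Bool.or_false,
    Bool.or_assoc]

theorem pvAny_eq_hasKeyword (n : String) :
    pvKeywords.any (fun k => PySem.Str.isIn k n) = pvHasKeyword n := by
  simp [pvKeywords, pvHasKeyword, List.any, Bool.or_assoc]

theorem pvAltLoop_eq (cols : List (String × String)) (fb : Option String) :
    pvAltLoop cols fb =
      match pvLoop1 cols with
      | some n => n
      | none =>
        match fb.or (pvLoop2 cols) with
        | some n => n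
        | none => "" := by
  induction cols generalizing fb with
  | nil => cases fb <;> simp [pvAltLoop, pvLoop1, pvLoop2, Option.or]
  | cons hd tl ih =>
    obtain ⟨n, d⟩ := hd
    simp only [pvAltLoop, pvLoop1, pvLoop2, pvContains_eq_isDateType, pvAny_eq_hasKeyword]
    cases hdt : pvIsDateType d <;> cases hk : pvHasKeyword n <;>
      simp only [if_true, if_false, Bool.false_eq_true, ih]
    cases fb <;> simp [Option.or]

-- ===== VERDICT (by name: the statement is the Claim_ definition above) =====
theorem find_date_column_spec : Claim_equal_find_date_column := by
  intro cols _
  unfold Spec_find_date_column find_date_column find_date_column_alt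
  rw [pvAltLoop_eq]
  cases pvLoop1 cols <;> cases pvLoop2 cols <;> simp [Option.or]
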